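-- pv_equiv track=rewrite | github.com/ppc86193-lgtm/cloud-function-source | pc28_mock_services.py | aggregate_by_user
-- ===== SOURCE A (Python) =====
-- from typing import Dict, List, Any, Optional
--
-- def aggregate_by_user(betting_data: List[Dict]) -> Dict:
--     """按用户聚合数据"""
--     result = {}
--     for bet in betting_data:
--         user_id = bet['user_id']
--         if user_id not in result:
--             result[user_id] = {'total_amount': 0, 'bet_count': 0}
--         result[user_id]['total_amount'] += bet['amount']
--         result[user_id]['bet_count'] += 1
--     return result
-- ===== SOURCE B (Python) =====
-- def aggregate_by_user(betting_data):
--     """按用户聚合数据 — staged passes: dedup user ids in first-occurrence order, then per-user filtered sum/count."""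
--     order = []
--     for bet in betting_data:
--         if bet['user_id'] not in order:
--             order.append(bet['user_id'])
--     result = {}
--     for uid in order:
--         group = [bet for bet in betting_data if bet['user_id'] == uid]
--         result[uid] = {'total_amount': sum(bet['amount'] for bet in group),
--                        'bet_count': len(group)}
--     return result
-- ===== Notes on version B (the rewrite author's own statement) =====
-- stated objective: alternative
-- what changed: B replaces A's single-pass accumulator dict with a staged group-by: first dedup user ids in order of first occurrence, then for each user filter its group out of the whole list and sum/count it.
import Mathlib
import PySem

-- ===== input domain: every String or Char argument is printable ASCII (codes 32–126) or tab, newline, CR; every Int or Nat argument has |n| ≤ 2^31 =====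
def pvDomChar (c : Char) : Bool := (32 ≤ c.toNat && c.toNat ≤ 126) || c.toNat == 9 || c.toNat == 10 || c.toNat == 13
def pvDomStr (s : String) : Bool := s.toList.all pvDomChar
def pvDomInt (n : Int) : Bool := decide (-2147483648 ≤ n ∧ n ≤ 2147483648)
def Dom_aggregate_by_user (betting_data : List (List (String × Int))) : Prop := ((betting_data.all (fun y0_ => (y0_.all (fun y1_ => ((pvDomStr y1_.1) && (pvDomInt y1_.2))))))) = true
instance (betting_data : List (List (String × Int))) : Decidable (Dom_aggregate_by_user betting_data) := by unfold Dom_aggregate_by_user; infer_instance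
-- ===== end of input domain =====

-- B replaces A's single-pass accumulator dict by a staged group-by (dedup the user ids in first-occurrence
-- order, then filter and sum/count each user's group); same results, different algorithm (objective: alternative).

-- ===== PORT A =====
-- bet['user_id'] / bet['amount']: KeyError (missing key) is excluded by Pre_, so the .getD 0 default is never reached under Pre_.
def aggregate_by_user (betting_data : List (List (String × Int))) : List (Int × List (String × Int)) :=
  let result : PySem.Dict Int (PySem.Dict String Int) :=
    betting_data.foldl (fun result bet =>
      let b := PySem.Dict.mk bet
      let user_id := (b.get? "user_id").getD 0
      let result :=
        if result.contains user_id = false then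
          result.insert user_id (PySem.Dict.mk [("total_amount", 0), ("bet_count", 0)])
        else result
      let result := result.modify user_id PySem.Dict.empty
        (fun inner => inner.modify "total_amount" 0 (· + (b.get? "amount").getD 0))
      result.modify user_id PySem.Dict.empty
        (fun inner => inner.modify "bet_count" 0 (· + 1))) PySem.Dict.empty
  result.items.map (fun p => (p.1, p.2.items))

-- ===== PORT B =====
def aggregate_by_user_alt (betting_data : List (List (String × Int))) : List (Int × List (String × Int)) :=
  -- pass 1: user ids in order of first occurrence ('if uid not in order: order.append(uid)')
  let order : List Int := betting_data.foldl (fun order bet =>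
      let uid := ((PySem.Dict.mk bet).get? "user_id").getD 0
      if order.contains uid then order else order ++ [uid]) []
  -- pass 2: one group filter + sum + len per distinct user id
  let result : PySem.Dict Int (PySem.Dict String Int) :=
    order.foldl (fun result uid =>
      let group := betting_data.filter (fun bet => ((PySem.Dict.mk bet).get? "user_id").getD 0 == uid)
      result.insert uid (PySem.Dict.mk
        [("total_amount", group.foldl (fun s bet => s + ((PySem.Dict.mk bet).get? "amount").getD 0) 0),
         ("bet_count", (group.length : Int))])) PySem.Dict.empty
  result.items.map (fun p => (p.1, p.2.items))

-- ===== PRECONDITION & SPEC =====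
-- Pre_ excludes exactly the inputs where A raises KeyError: a bet dict missing 'user_id' or 'amount'.
def Pre_aggregate_by_user (betting_data : List (List (String × Int))) : Prop :=
  ∀ bet ∈ betting_data, "user_id" ∈ bet.map Prod.fst ∧ "amount" ∈ bet.map Prod.fst
instance (betting_data : List (List (String × Int))) : Decidable (Pre_aggregate_by_user betting_data) := by unfold Pre_aggregate_by_user; infer_instance
def pvWitness_aggregate_by_user : (List (List (String × Int))) := [[("user_id", 1), ("amount", 5)], [("user_id", 1), ("amount", 2)], [("user_id", 2), ("amount", 3)]]
def Spec_aggregate_by_user (betting_data : List (List (String × Int))) (out : List (Int × List (String × Int))) : Prop := out = aggregate_by_user_alt betting_data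
instance (betting_data : List (List (String × Int))) (out : List (Int × List (String × Int))) : Decidable (Spec_aggregate_by_user betting_data out) := by unfold Spec_aggregate_by_user; infer_instance

-- ===== CLAIM (what is proved, stated in full; the proofs are below) =====
def Claim_equal_aggregate_by_user : Prop := ∀ (betting_data : List (List (String × Int))), Dom_aggregate_by_user betting_data → Pre_aggregate_by_user betting_data → Spec_aggregate_by_user betting_data (aggregate_by_user betting_data)

-- ===== LEMMAS AND PROOFS =====

-- the user id / amount a bet record carries (shorthand for the proofs)
def uidOf (bet : List (String × Int)) : Int := ((PySem.Dict.mk bet).get? "user_id").getD 0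
def amtOf (bet : List (String × Int)) : Int := ((PySem.Dict.mk bet).get? "amount").getD 0

-- B's per-user sum and count over the whole list
def sumU (l : List (List (String × Int))) (u : Int) : Int :=
  (l.filter (fun bet => uidOf bet == u)).foldl (fun s bet => s + amtOf bet) 0
def cntU (l : List (List (String × Int))) (u : Int) : Int :=
  ((l.filter (fun bet => uidOf bet == u)).length : Int)

-- the nested dict A keeps for a user whose flat (sum, count) accumulator is p
def convI (p : Int × Int) : PySem.Dict String Int :=
  PySem.Dict.mk [("total_amount", p.1), ("bet_count", p.2)]

-- a flat accumulator dict, rendered as A's dict-of-dicts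
def conv (t : PySem.Dict Int (Int × Int)) : PySem.Dict Int (PySem.Dict String Int) :=
  PySem.Dict.mk (t.items.map (fun p => (p.1, convI p.2)))

lemma contains_conv (t : PySem.Dict Int (Int × Int)) (k : Int) :
    (conv t).contains k = t.contains k := by
  simp [conv, PySem.Dict.contains, List.any_map, Function.comp_def]

lemma get?_conv (t : PySem.Dict Int (Int × Int)) (k : Int) :
    (conv t).get? k = (t.get? k).map convI := by
  simp [conv, PySem.Dict.get?, List.find?_map, Function.comp_def]

lemma insert_conv (t : PySem.Dict Int (Int × Int)) (k : Int) (p : Int × Int) :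
    (conv t).insert k (convI p) = conv (t.insert k p) := by
  unfold PySem.Dict.insert
  rw [contains_conv]
  split_ifs with h
  · simp only [conv, List.map_map]
    congr 1
    apply List.map_congr_left
    intro q _
    by_cases hq : q.1 = k <;> simp [hq]
  · simp [conv]

lemma modify_modify {κ ν : Type} [BEq κ] [LawfulBEq κ] (d : PySem.Dict κ ν) (k : κ) (dflt : ν)
    (f g : ν → ν) : (d.modify k dflt f).modify k dflt g = d.insert k (g (f (d.getD k dflt))) := by
  rw [PySem.Dict.modify, PySem.Dict.modify, PySem.Dict.getD_insert_self,
    PySem.Dict.insert_insert_self]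

-- one iteration of A's loop on a state the flat fold could have produced = the flat step rendered by conv
lemma step_conv (t : PySem.Dict Int (Int × Int)) (bet : List (String × Int)) :
    (((if (conv t).contains (((PySem.Dict.mk bet).get? "user_id").getD 0) = false then
        (conv t).insert (((PySem.Dict.mk bet).get? "user_id").getD 0)
          (PySem.Dict.mk [("total_amount", 0), ("bet_count", 0)])
      else conv t).modify (((PySem.Dict.mk bet).get? "user_id").getD 0) PySem.Dict.empty
        (fun inner => inner.modify "total_amount" 0 (· + ((PySem.Dict.mk bet).get? "amount").getD 0))).modify
        (((PySem.Dict.mk bet).get? "user_id").getD 0) PySem.Dict.empty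
        (fun inner => inner.modify "bet_count" 0 (· + 1)))
    = conv (t.insert (uidOf bet)
        ((t.getD (uidOf bet) (0, 0)).1 + amtOf bet, (t.getD (uidOf bet) (0, 0)).2 + 1)) := by
  set uid := uidOf bet with huid
  set amt := amtOf bet with hamt
  rw [show ((PySem.Dict.mk bet).get? "user_id").getD 0 = uid from rfl,
    show ((PySem.Dict.mk bet).get? "amount").getD 0 = amt from rfl]
  rw [modify_modify]
  by_cases h : t.contains uid = true
  · obtain ⟨sc, hsc⟩ : ∃ sc, t.get? uid = some sc := by
      rcases ho : t.get? uid with _ | sc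
      · rw [PySem.Dict.contains_eq_isSome_get?, ho] at h
        exact absurd h (by simp)
      · exact ⟨sc, rfl⟩
    have hsd : t.getD uid (0, 0) = sc := by simp [PySem.Dict.getD, hsc]
    rw [contains_conv, h]
    simp only [Bool.true_eq_false, if_false]
    have hg : (conv t).getD uid PySem.Dict.empty = convI sc := by
      simp [PySem.Dict.getD, get?_conv, hsc]
    rw [hg, hsd]
    have hv : ((convI sc).modify "total_amount" 0 (· + amt)).modify "bet_count" 0 (· + 1)
        = convI (sc.1 + amt, sc.2 + 1) := by
      simp [convI, PySem.Dict.modify, PySem.Dict.insert, PySem.Dict.getD, PySem.Dict.get?,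
        PySem.Dict.contains]
    rw [hv, insert_conv]
  · have h' : t.contains uid = false := by simpa using h
    have hsd : t.getD uid (0, 0) = (0, 0) := PySem.Dict.getD_of_not_contains t (0, 0) h'
    rw [contains_conv, h']
    simp only [if_true]
    rw [PySem.Dict.getD_insert_self, PySem.Dict.insert_insert_self, hsd]
    have hv : ((PySem.Dict.mk [("total_amount", 0), ("bet_count", 0)]).modify "total_amount" 0
          (· + amt)).modify "bet_count" 0 (· + 1)
        = convI ((0 : Int) + amt, (0 : Int) + 1) := by
      simp [convI, PySem.Dict.modify, PySem.Dict.insert, PySem.Dict.getD, PySem.Dict.get?,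
        PySem.Dict.contains]
    rw [hv, insert_conv]

-- A's whole loop is the flat (sum, count) fold, rendered by conv
lemma loop_conv (l : List (List (String × Int))) (t : PySem.Dict Int (Int × Int)) :
    l.foldl (fun result bet =>
      let b := PySem.Dict.mk bet
      let user_id := (b.get? "user_id").getD 0
      let result :=
        if result.contains user_id = false then
          result.insert user_id (PySem.Dict.mk [("total_amount", 0), ("bet_count", 0)])
        else result
      let result := result.modify user_id PySem.Dict.empty
        (fun inner => inner.modify "total_amount" 0 (· + (b.get? "amount").getD 0))
      result.modify user_id PySem.Dict.empty
        (fun inner => inner.modify "bet_count" 0 (· + 1))) (conv t)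
    = conv (l.foldl (fun t bet => t.insert (uidOf bet)
        ((t.getD (uidOf bet) (0, 0)).1 + amtOf bet, (t.getD (uidOf bet) (0, 0)).2 + 1)) t) := by
  induction l generalizing t with
  | nil => rfl
  | cons bet rest ih =>
    simp only [List.foldl_cons]
    rw [step_conv, ih]

-- what the flat fold holds for each user: the initial value plus B's per-user sum and count
lemma getD_flat (l : List (List (String × Int))) (t : PySem.Dict Int (Int × Int)) (u : Int) :
    (l.foldl (fun t bet => t.insert (uidOf bet)
        ((t.getD (uidOf bet) (0, 0)).1 + amtOf bet, (t.getD (uidOf bet) (0, 0)).2 + 1)) t).getD u (0, 0)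
      = ((t.getD u (0, 0)).1 + sumU l u, (t.getD u (0, 0)).2 + cntU l u) := by
  induction l generalizing t with
  | nil => simp [sumU, cntU]
  | cons bet rest ih =>
    simp only [List.foldl_cons]
    rw [ih]
    by_cases h : uidOf bet = u
    · have hgd : (t.insert (uidOf bet)
          ((t.getD (uidOf bet) (0, 0)).1 + amtOf bet, (t.getD (uidOf bet) (0, 0)).2 + 1)).getD u (0, 0)
          = ((t.getD u (0, 0)).1 + amtOf bet, (t.getD u (0, 0)).2 + 1) := by
        rw [h, PySem.Dict.getD_insert_self]
      have hf : (bet :: rest).filter (fun b => uidOf b == u)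
          = bet :: rest.filter (fun b => uidOf b == u) := by
        simp [h]
      have hs : sumU (bet :: rest) u = amtOf bet + sumU rest u := by
        rw [sumU, hf, List.foldl_cons, zero_add, sumU]
        simp only [PySem.List.foldl_add]
        ring
      have hc : cntU (bet :: rest) u = cntU rest u + 1 := by
        rw [cntU, hf, List.length_cons, cntU]; push_cast; ring
      rw [hgd, hs, hc, Prod.mk.injEq]
      constructor <;> ring
    · have hne : u ≠ uidOf bet := fun hh => h hh.symm
      have hgd : (t.insert (uidOf bet)
          ((t.getD (uidOf bet) (0, 0)).1 + amtOf bet, (t.getD (uidOf bet) (0, 0)).2 + 1)).getD u (0, 0)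
          = t.getD u (0, 0) := PySem.Dict.getD_insert_of_ne t _ _ hne
      have hf : (bet :: rest).filter (fun b => uidOf b == u)
          = rest.filter (fun b => uidOf b == u) := by
        simp [h]
      rw [hgd]
      simp only [sumU, cntU]
      rw [hf]

-- B's first pass is Set.ofList of the user ids
lemma order_eq (l : List (List (String × Int))) :
    l.foldl (fun order bet =>
      let uid := ((PySem.Dict.mk bet).get? "user_id").getD 0
      if order.contains uid then order else order ++ [uid]) []
    = PySem.Set.ofList (l.map uidOf) := by
  rw [← PySem.Set.update_nil_left, PySem.Set.update_map_eq_foldl_add]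
  apply PySem.List.foldl_congr_mem
  intro s bet _
  simp [PySem.Set.add_eq_ite, uidOf]

-- ===== VERDICT (by name: the statement is the Claim_ definition above) =====
theorem aggregate_by_user_spec : Claim_equal_aggregate_by_user := by
  intro betting_data _ _
  unfold Spec_aggregate_by_user aggregate_by_user aggregate_by_user_alt
  simp only
  rw [order_eq]
  conv_lhs => rw [show (PySem.Dict.empty : PySem.Dict Int (PySem.Dict String Int))
    = conv PySem.Dict.empty from rfl, loop_conv]
  -- name the flat fold
  set F : PySem.Dict Int (Int × Int) := betting_data.foldl (fun t bet => t.insert (uidOf bet)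
      ((t.getD (uidOf bet) (0, 0)).1 + amtOf bet, (t.getD (uidOf bet) (0, 0)).2 + 1))
      PySem.Dict.empty with hF
  have hnd : F.keys.Nodup := by
    rw [hF]
    exact PySem.Dict.nodup_keys_foldl_insert_key (ν := Int × Int) betting_data uidOf
      (fun t bet => ((t.getD (uidOf bet) (0, 0)).1 + amtOf bet, (t.getD (uidOf bet) (0, 0)).2 + 1))
      PySem.Dict.empty (by simp [PySem.Dict.keys_empty])
  have hkeys : F.keys = PySem.Set.ofList (betting_data.map uidOf) := by
    rw [hF]
    have := PySem.Dict.keys_foldl_insert_key (ν := Int × Int) betting_data uidOf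
      (fun t bet => ((t.getD (uidOf bet) (0, 0)).1 + amtOf bet, (t.getD (uidOf bet) (0, 0)).2 + 1))
      PySem.Dict.empty
    rw [PySem.Dict.keys_empty, PySem.Set.update_nil_left] at this
    exact this
  -- A's side: items of the flat fold, rendered by conv
  have hA : (conv F).items = F.items.map (fun p => (p.1, convI p.2)) := rfl
  rw [hA, PySem.Dict.items_eq_map_keys F hnd (0, 0), hkeys]
  -- B's side: rewrite the second-pass body into convI of (sumU, cntU), then unfold the fresh fold
  have hBody : (PySem.Set.ofList (betting_data.map uidOf)).foldl
      (fun result uid =>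
        let group := betting_data.filter (fun bet => ((PySem.Dict.mk bet).get? "user_id").getD 0 == uid)
        result.insert uid (PySem.Dict.mk
          [("total_amount", group.foldl (fun s bet => s + ((PySem.Dict.mk bet).get? "amount").getD 0) 0),
           ("bet_count", (group.length : Int))])) PySem.Dict.empty
      = (PySem.Set.ofList (betting_data.map uidOf)).foldl
        (fun result uid => result.insert uid (convI (sumU betting_data uid, cntU betting_data uid)))
        PySem.Dict.empty := by
    apply PySem.List.foldl_congr_mem
    intro d uid _
    rfl
  rw [hBody, PySem.Dict.items_foldl_insert_fresh
    (PySem.Set.ofList (betting_data.map uidOf)) (fun u => u)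
    (fun u => convI (sumU betting_data u, cntU betting_data u)) PySem.Dict.empty
    (by intro a _; exact PySem.Dict.contains_empty a)
    (by simp [PySem.Set.nodup_ofList])]
  simp only [List.map_map, Function.comp_def,
    show (PySem.Dict.empty : PySem.Dict Int (PySem.Dict String Int)).items = [] from rfl,
    List.nil_append]
  apply List.map_congr_left
  intro u _
  rw [getD_flat]
  simp [PySem.Dict.getD_empty]
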